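-- pv_equiv track=rewrite | github.com/omnipotence-eth/godspeed-coding-agent | src/godspeed/config.py | get_model_context_window
-- ===== SOURCE A (Python) =====
-- MODEL_CONTEXT_WINDOWS: dict[str, int] = {
--     # Frontier models with large context
--     "claude-opus": 200_000,
--     "claude-sonnet": 200_000,
--     "claude-haiku": 200_000,
--     "gpt-4o": 128_000,
--     "gpt-4-turbo": 128_000,
--     "gpt-4": 8_192,
--     "gpt-3.5": 16_385,
--     "gemini-2": 1_000_000,
--     "gemini-1.5": 1_000_000,
--     "gemini-pro": 32_000,
--     # Open-source models (common Ollama defaults)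
--     "ollama/qwen3": 32_768,
--     "ollama/llama3": 8_192,
--     "ollama/llama3.1": 128_000,
--     "ollama/mistral": 32_768,
--     "ollama/codellama": 16_384,
--     "ollama/deepseek": 32_768,
--     "ollama/gemma": 8_192,
--     "ollama/phi": 16_384,
-- }
--
-- def get_model_context_window(model: str) -> int:
--     """Get the context window size for a model by prefix matching.
--
--     Returns the matched size or 32_768 as a safe default.
--     """
--     model_lower = model.lower()
--     # Try longest prefix match first for specificity
--     best_match = ""
--     best_size = 32_768  # safe default
--     for prefix, size in MODEL_CONTEXT_WINDOWS.items():
--         if model_lower.startswith(prefix.lower()) and len(prefix) > len(best_match):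
--             best_match = prefix
--             best_size = size
--     return best_size
-- ===== SOURCE B (Python) =====
-- MODEL_CONTEXT_WINDOWS: dict[str, int] = {
--     "claude-opus": 200_000,
--     "claude-sonnet": 200_000,
--     "claude-haiku": 200_000,
--     "gpt-4o": 128_000,
--     "gpt-4-turbo": 128_000,
--     "gpt-4": 8_192,
--     "gpt-3.5": 16_385,
--     "gemini-2": 1_000_000,
--     "gemini-1.5": 1_000_000,
--     "gemini-pro": 32_000,
--     "ollama/qwen3": 32_768,
--     "ollama/llama3": 8_192,
--     "ollama/llama3.1": 128_000,
--     "ollama/mistral": 32_768,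
--     "ollama/codellama": 16_384,
--     "ollama/deepseek": 32_768,
--     "ollama/gemma": 8_192,
--     "ollama/phi": 16_384,
-- }
--
-- _MAX_PREFIX_LEN = max((len(k) for k in MODEL_CONTEXT_WINDOWS), default=0)
--
--
-- def get_model_context_window(model: str) -> int:
--     """Get the context window size for a model by prefix matching.
--
--     Walks the model's own prefixes, longest first, and uses the table as a
--     hash lookup; returns 32_768 as a safe default.
--     """
--     model_lower = model.lower()
--     for n in range(min(len(model_lower), _MAX_PREFIX_LEN), 0, -1):
--         size = MODEL_CONTEXT_WINDOWS.get(model_lower[:n])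
--         if size is not None:
--             return size
--     return 32_768
-- ===== Notes on version B (the rewrite author's own statement) =====
-- stated objective: alternative
-- what changed: Instead of scanning the whole table while tracking the longest matching key, B walks the model string's own prefixes from the longest possible match down and returns on the first dict hit.
import Mathlib
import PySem

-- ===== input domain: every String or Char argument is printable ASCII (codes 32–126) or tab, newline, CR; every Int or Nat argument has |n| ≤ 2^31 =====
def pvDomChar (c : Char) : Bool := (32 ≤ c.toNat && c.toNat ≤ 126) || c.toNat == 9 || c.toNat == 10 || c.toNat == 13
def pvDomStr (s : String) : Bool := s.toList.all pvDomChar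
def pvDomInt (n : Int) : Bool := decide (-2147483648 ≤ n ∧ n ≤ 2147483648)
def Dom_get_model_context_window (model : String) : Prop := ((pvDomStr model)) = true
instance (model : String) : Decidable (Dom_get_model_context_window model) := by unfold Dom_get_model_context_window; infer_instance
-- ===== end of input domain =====

-- B replaces A's whole-table scan tracking the longest match by a descent over the
-- model's own prefixes (longest first) with a dict hash lookup; alternative structure, same cost.

-- ===== PORT A =====
def pvTbl : PySem.Dict String Int := PySem.Dict.ofList
  [("claude-opus", 200000), ("claude-sonnet", 200000), ("claude-haiku", 200000),
   ("gpt-4o", 128000), ("gpt-4-turbo", 128000), ("gpt-4", 8192), ("gpt-3.5", 16385),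
   ("gemini-2", 1000000), ("gemini-1.5", 1000000), ("gemini-pro", 32000),
   ("ollama/qwen3", 32768), ("ollama/llama3", 8192), ("ollama/llama3.1", 128000),
   ("ollama/mistral", 32768), ("ollama/codellama", 16384), ("ollama/deepseek", 32768),
   ("ollama/gemma", 8192), ("ollama/phi", 16384)]

def get_model_context_window (model : String) : Int :=
  let model_lower := PySem.Str.lower model
  (pvTbl.items.foldl
    (fun (best : String × Int) kv =>
      if PySem.Str.startswith model_lower (PySem.Str.lower kv.1)
          && decide (PySem.Str.len kv.1 > PySem.Str.len best.1)
      then (kv.1, kv.2) else best)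
    ("", 32768)).2

-- ===== PORT B =====
-- _MAX_PREFIX_LEN = max((len(k) for k in MODEL_CONTEXT_WINDOWS), default=0)
def pvMaxPrefixLen : Nat := (pvTbl.keys.map (fun k => (PySem.Str.len k).toNat)).foldl max 0

-- the descending loop: n counts down from min(len(model_lower), _MAX_PREFIX_LEN) to 1
def pvDescend (ml : String) : Nat → Int
  | 0 => 32768
  | n + 1 =>
    match pvTbl.get? (PySem.Str.slice ml none (some ((n + 1 : Nat) : Int))) with
    | some v => v
    | none => pvDescend ml n

def get_model_context_window_alt (model : String) : Int :=
  let model_lower := PySem.Str.lower model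
  pvDescend model_lower (min (PySem.Str.len model_lower).toNat pvMaxPrefixLen)

-- ===== PRECONDITION & SPEC =====
def Spec_get_model_context_window (model : String) (out : Int) : Prop := out = get_model_context_window_alt model
instance (model : String) (out : Int) : Decidable (Spec_get_model_context_window model out) := by unfold Spec_get_model_context_window; infer_instance

-- ===== CLAIM (what is proved, stated in full; the proofs are below) =====
def Claim_equal_get_model_context_window : Prop := ∀ (model : String), Dom_get_model_context_window model → Spec_get_model_context_window model (get_model_context_window model)

-- ===== LEMMAS AND PROOFS =====

-- A's fold step, named for the proofs (definitionally the lambda in the port)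
def pvStep (ml : String) (best : String × Int) (kv : String × Int) : String × Int :=
  if PySem.Str.startswith ml (PySem.Str.lower kv.1)
      && decide (PySem.Str.len kv.1 > PySem.Str.len best.1)
  then (kv.1, kv.2) else best

theorem pvA_eq_fold (model : String) :
    get_model_context_window model =
      (pvTbl.items.foldl (pvStep (PySem.Str.lower model)) ("", 32768)).2 := rfl

theorem pv_keys_nodup : pvTbl.keys.Nodup := by decide

theorem pv_keys_lower : ∀ kv ∈ pvTbl.items, PySem.Str.lower kv.1 = kv.1 := by decide

theorem pv_keys_nonempty : ∀ kv ∈ pvTbl.items, 1 ≤ kv.1.toList.length := by decide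

theorem pv_keys_short : ∀ kv ∈ pvTbl.items, kv.1.toList.length ≤ pvMaxPrefixLen := by decide

-- string equality from toList equality
theorem pv_toList_inj {s t : String} (h : s.toList = t.toList) : s = t :=
  String.toList_inj.mp h

-- a matching key's condition, on the list side
theorem pv_cond_iff (ml : String) (kv : String × Int) (hk : kv ∈ pvTbl.items) :
    (PySem.Str.startswith ml (PySem.Str.lower kv.1) = true) ↔ kv.1.toList <+: ml.toList := by
  rw [pv_keys_lower kv hk]
  constructor
  · intro h
    exact (PySem.Chars.startswith_iff _ _).mp (by simpa [PySem.Str.startswith_eq] using h)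
  · intro h
    simpa [PySem.Str.startswith_eq] using (PySem.Chars.startswith_iff _ _).mpr h

-- fold when nothing matches
theorem pv_fold_id (ml : String) (ts : List (String × Int)) (b : String × Int)
    (h : ∀ kv ∈ ts, PySem.Str.startswith ml (PySem.Str.lower kv.1) = false) :
    ts.foldl (pvStep ml) b = b := by
  induction ts generalizing b with
  | nil => rfl
  | cons kv ts ih =>
    have h0 := h kv (by simp)
    have hstep : pvStep ml b kv = b := by
      unfold pvStep
      rw [h0]
      simp
    rw [List.foldl_cons, hstep]
    exact ih b (fun x hx => h x (by simp [hx]))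

-- the fold invariant
theorem pv_fold_char (ml : String) (ts : List (String × Int)) (b : String × Int) :
    (ts.foldl (pvStep ml) b = b ∨
      (ts.foldl (pvStep ml) b ∈ ts ∧
        PySem.Str.startswith ml (PySem.Str.lower (ts.foldl (pvStep ml) b).1) = true))
    ∧ b.1.toList.length ≤ (ts.foldl (pvStep ml) b).1.toList.length
    ∧ ∀ kv ∈ ts, PySem.Str.startswith ml (PySem.Str.lower kv.1) = true →
        kv.1.toList.length ≤ (ts.foldl (pvStep ml) b).1.toList.length := by
  induction ts generalizing b with
  | nil => exact ⟨Or.inl rfl, le_refl _, by simp⟩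
  | cons kv ts ih =>
    simp only [List.foldl_cons]
    by_cases hc : (PySem.Str.startswith ml (PySem.Str.lower kv.1)
        && decide (PySem.Str.len kv.1 > PySem.Str.len b.1)) = true
    · -- step takes kv
      have hstep : pvStep ml b kv = (kv.1, kv.2) := by
        unfold pvStep; rw [if_pos hc]
      rw [hstep]
      obtain ⟨ha, hb, hcc⟩ := ih (kv.1, kv.2)
      have hlen : b.1.toList.length < kv.1.toList.length := by
        have h2 := of_decide_eq_true ((Bool.and_eq_true _ _).mp hc).2
        have e1 : PySem.Str.len kv.1 = (kv.1.toList.length : Int) := by simp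
        have e2 : PySem.Str.len b.1 = (b.1.toList.length : Int) := by simp
        rw [e1, e2] at h2
        omega
      refine ⟨?_, ?_, ?_⟩
      · rcases ha with ha | ⟨hm, hs⟩
        · rw [ha]
          exact Or.inr ⟨by simp, by
            have := (Bool.and_eq_true _ _).mp hc |>.1; simpa using this⟩
        · exact Or.inr ⟨by simp [hm], hs⟩
      · calc b.1.toList.length ≤ kv.1.toList.length := le_of_lt hlen
          _ ≤ _ := hb
      · intro x hx hxs
        rcases List.mem_cons.mp hx with rfl | hx'
        · exact hb
        · exact hcc x hx' hxs
    · have hstep : pvStep ml b kv = b := by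
        unfold pvStep; rw [if_neg hc]
      rw [hstep]
      obtain ⟨ha, hb, hcc⟩ := ih b
      refine ⟨?_, hb, ?_⟩
      · rcases ha with ha | ⟨hm, hs⟩
        · exact Or.inl ha
        · exact Or.inr ⟨by simp [hm], hs⟩
      · intro x hx hxs
        rcases List.mem_cons.mp hx with rfl | hx'
        · -- x = kv matched but step rejected it: its length ≤ b's length ≤ result's
          have hnot : ¬ (PySem.Str.len x.1 > PySem.Str.len b.1) := by
            intro hgt
            exact hc (by rw [hxs, Bool.true_and]; exact decide_eq_true hgt)
          have : x.1.toList.length ≤ b.1.toList.length := by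
            have h2 := le_of_not_gt hnot
            have e1 : PySem.Str.len x.1 = (x.1.toList.length : Int) := by simp
            have e2 : PySem.Str.len b.1 = (b.1.toList.length : Int) := by simp
            rw [e1, e2] at h2
            exact_mod_cast h2
          exact le_trans this hb
        · exact hcc x hx' hxs

-- the slice ml[:m] on the list side
theorem pv_slice_toList (ml : String) (m : Nat) :
    (PySem.Str.slice ml none (some (m : Int))).toList = ml.toList.take m := by
  simp [PySem.Str.toList_slice, PySem.List.slice_to_natCast]

-- B's loop: no hit anywhere below n
theorem pv_descend_default (ml : String) (n : Nat)
    (h : ∀ m : Nat, 1 ≤ m → m ≤ n →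
        pvTbl.get? (PySem.Str.slice ml none (some (m : Int))) = none) :
    pvDescend ml n = 32768 := by
  induction n with
  | zero => rfl
  | succ n ih =>
    have h0 := h (n + 1) (by omega) (le_refl _)
    simp only [pvDescend, h0]
    exact ih (fun m h1 h2 => h m h1 (by omega))

-- B's loop: first (= largest) hit at m
theorem pv_descend_hit (ml : String) (n m : Nat) (v : Int)
    (h1 : 1 ≤ m) (h2 : m ≤ n)
    (hv : pvTbl.get? (PySem.Str.slice ml none (some (m : Int))) = some v)
    (habove : ∀ m' : Nat, m < m' → m' ≤ n →
        pvTbl.get? (PySem.Str.slice ml none (some (m' : Int))) = none) :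
    pvDescend ml n = v := by
  induction n with
  | zero => omega
  | succ n ih =>
    by_cases hm : m = n + 1
    · subst hm
      simp only [pvDescend, hv]
    · have h0 := habove (n + 1) (by omega) (le_refl _)
      simp only [pvDescend, h0]
      exact ih (by omega) (fun m' ha hb => habove m' ha (by omega))

-- a get?-hit names a table key equal to the slice
theorem pv_get?_some_mem (ml : String) (m : Nat) (v : Int)
    (h : pvTbl.get? (PySem.Str.slice ml none (some (m : Int))) = some v) :
    (PySem.Str.slice ml none (some (m : Int)), v) ∈ pvTbl.items :=
  PySem.Dict.mem_items_of_get?_eq_some pvTbl h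

-- ===== VERDICT (by name: the statement is the Claim_ definition above) =====
theorem get_model_context_window_spec : Claim_equal_get_model_context_window := by
  unfold Claim_equal_get_model_context_window
  intro model _
  unfold Spec_get_model_context_window
  rw [pvA_eq_fold]
  unfold get_model_context_window_alt
  set ml := PySem.Str.lower model with hml
  set n0 := min (PySem.Str.len ml).toNat pvMaxPrefixLen with hn0
  have hlenml : PySem.Str.len ml = (ml.toList.length : Int) := by simp
  have hn0len : n0 ≤ ml.toList.length := by
    have h1 : n0 ≤ (PySem.Str.len ml).toNat := Nat.min_le_left _ _
    omega
  by_cases hmatch : ∀ kv ∈ pvTbl.items, PySem.Str.startswith ml (PySem.Str.lower kv.1) = false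
  · -- no key matches: A returns the default, B never hits
    rw [pv_fold_id ml pvTbl.items ("", 32768) hmatch]
    symm
    apply pv_descend_default
    intro m hm1 hm2
    by_contra hne
    obtain ⟨v, hv⟩ := Option.ne_none_iff_exists'.mp hne
    have hmem := pv_get?_some_mem ml m v hv
    have hpre : (PySem.Str.slice ml none (some (m : Int))).toList <+: ml.toList := by
      rw [pv_slice_toList]; exact List.take_prefix m ml.toList
    have := (pv_cond_iff ml _ hmem).mpr hpre
    rw [hmatch _ hmem] at this
    exact Bool.false_ne_true this
  · push_neg at hmatch
    obtain ⟨kv0, hkv0, hs0⟩ := hmatch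
    have hs0' : PySem.Str.startswith ml (PySem.Str.lower kv0.1) = true := by
      simpa using hs0
    obtain ⟨ha, _, hc⟩ := pv_fold_char ml pvTbl.items ("", 32768)
    set r := pvTbl.items.foldl (pvStep ml) ("", 32768) with hr
    -- the result is a real matching entry
    have hlen0 : 1 ≤ r.1.toList.length :=
      le_trans (pv_keys_nonempty kv0 hkv0) (hc kv0 hkv0 hs0')
    rcases ha with ha | ⟨hmem, hs⟩
    · exfalso
      rw [ha] at hlen0
      simp at hlen0
    · -- r ∈ items, r.1 <+: ml.toList, r.1 of maximal length among matches
      have hpre : r.1.toList <+: ml.toList := (pv_cond_iff ml r hmem).mp hs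
      set m := r.1.toList.length with hm
      have hm1 : 1 ≤ m := hlen0
      have hmlen : m ≤ ml.toList.length := hpre.length_le
      have hmmax : m ≤ pvMaxPrefixLen := pv_keys_short r hmem
      have hmn0 : m ≤ n0 := by
        have : m ≤ (PySem.Str.len ml).toNat := by omega
        exact le_min this hmmax
      -- the slice at m IS r.1
      have hslice : PySem.Str.slice ml none (some (m : Int)) = r.1 := by
        apply pv_toList_inj
        rw [pv_slice_toList]
        exact (List.prefix_iff_eq_take.mp hpre).symm
      have hmem' : (r.1, r.2) ∈ pvTbl.items := by rw [Prod.mk.eta]; exact hmem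
      have hget : pvTbl.get? (PySem.Str.slice ml none (some (m : Int))) = some r.2 := by
        rw [hslice]
        exact PySem.Dict.get?_of_mem_items pvTbl hmem' pv_keys_nodup
      symm
      apply pv_descend_hit ml n0 m r.2 hm1 hmn0 hget
      intro m' hlt hle
      by_contra hne
      obtain ⟨v, hv⟩ := Option.ne_none_iff_exists'.mp hne
      have hmem' := pv_get?_some_mem ml m' v hv
      have hpre' : (PySem.Str.slice ml none (some (m' : Int))).toList <+: ml.toList := by
        rw [pv_slice_toList]; exact List.take_prefix m' ml.toList
      have hcond' := (pv_cond_iff ml _ hmem').mpr hpre'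
      have hlenle := hc _ hmem' hcond'
      have hde : ((PySem.Str.slice ml none (some (m' : Int)), v)).1 = PySem.Str.slice ml none (some (m' : Int)) := rfl
      rw [hde] at hlenle
      have hlen' : (PySem.Str.slice ml none (some (m' : Int))).toList.length = m' := by
        rw [pv_slice_toList]
        exact List.length_take_of_le (le_trans hle hn0len)
      omega
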